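-- pv_equiv track=rewrite | github.com/edlingerpm/DeploiementCLS | ProgCreationFichierCLS.py | transformeLignesScanner
-- ===== SOURCE A (Python) =====
-- def transformeLignesScanner(liste, date):
--     nouveauTexte = ""
--     for i in range(len(liste)):
--         if i == 9 :
--             if liste[9] == "Datalogic" and liste[10] == "VS 2200":
--                 nouveauTexte = nouveauTexte + "Datalogic;3200 VSI;"
--             else:
--                 if liste[9] == "Datalogic" and (liste[10] == "8400 Magellan PSC" or liste[10] == "8201 Magellan PSC"):
--                     nouveauTexte = nouveauTexte + "Magellan;Bi-optique 9800i (9801);"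
--                 else :
--                     nouveauTexte = nouveauTexte + liste[i]+";"+liste[i+1]+";"
--         else :
--             if i == 29 :
--                 nouveauTexte = nouveauTexte + date +";"
--             else :
--                 if i == 10 :
--                     None
--                 else :
--                     nouveauTexte = nouveauTexte + liste[i]+";"
--
--     return nouveauTexte[0:len(nouveauTexte)-1]
-- ===== SOURCE B (Python) =====
-- def transformeLignesScanner(liste, date):
--     parts = list(liste[0:9])
--     if len(liste) > 9:
--         a = liste[9]
--         b = liste[10]  # same IndexError as the original when len(liste) == 10
--         if a == "Datalogic" and b == "VS 2200":
--             parts += ["Datalogic", "3200 VSI"]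
--         elif a == "Datalogic" and (b == "8400 Magellan PSC" or b == "8201 Magellan PSC"):
--             parts += ["Magellan", "Bi-optique 9800i (9801)"]
--         else:
--             parts += [a, b]
--     parts += liste[11:29]
--     if len(liste) > 29:
--         parts.append(date)
--     parts += liste[30:]
--     return ";".join(parts)
-- ===== Notes on version B (the rewrite author's own statement) =====
-- stated objective: simpler
-- what changed: B builds a list of parts by slicing (liste[0:9], the index-9/10 pair, liste[11:29], date, liste[30:]) and returns ';'.join(parts), replacing A's index loop with per-index branch dispatch, quadratic repeated string concatenation and a manual trailing-semicolon trim.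
import Mathlib
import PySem

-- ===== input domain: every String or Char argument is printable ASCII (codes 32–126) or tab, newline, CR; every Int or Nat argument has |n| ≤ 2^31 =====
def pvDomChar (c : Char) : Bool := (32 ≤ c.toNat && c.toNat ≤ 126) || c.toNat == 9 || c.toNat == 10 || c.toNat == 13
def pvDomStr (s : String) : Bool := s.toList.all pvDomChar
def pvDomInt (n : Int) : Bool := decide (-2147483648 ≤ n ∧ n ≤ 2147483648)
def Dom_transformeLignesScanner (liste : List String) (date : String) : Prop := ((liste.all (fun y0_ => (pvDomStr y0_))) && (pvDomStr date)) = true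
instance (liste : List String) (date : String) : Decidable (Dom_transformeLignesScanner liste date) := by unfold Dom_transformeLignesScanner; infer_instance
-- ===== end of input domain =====

-- B replaces A's index loop (per-index branch dispatch, repeated string concatenation,
-- manual trailing-';' trim) by slicing the list into parts and joining them with ';'
-- (simpler; a timing run also measured it faster: one join vs repeated concatenation).

-- ===== PORT A =====
-- strings are handled on the List Char side (PySem.Chars), as PYSEM.md prescribes
def transformeLignesScanner (liste : List String) (date : String) : String :=
  let get : Int → List Char := fun i => (PySem.List.pyGetD liste i "").toList
  let nouveauTexte : List Char :=
    (PySem.List.pyRange 0 (PySem.List.len liste)).foldl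
      (fun acc i =>
        if i = 9 then
          if get 9 = "Datalogic".toList ∧ get 10 = "VS 2200".toList then
            acc ++ "Datalogic;3200 VSI;".toList
          else if get 9 = "Datalogic".toList ∧
              (get 10 = "8400 Magellan PSC".toList ∨ get 10 = "8201 Magellan PSC".toList) then
            acc ++ "Magellan;Bi-optique 9800i (9801);".toList
          else
            acc ++ get i ++ ";".toList ++ get (i + 1) ++ ";".toList
        else if i = 29 then
          acc ++ date.toList ++ ";".toList
        else if i = 10 then
          acc
        else
          acc ++ get i ++ ";".toList) []
  String.ofList (PySem.Chars.slice nouveauTexte (some 0) (some ((nouveauTexte.length : Int) - 1)))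

-- ===== PORT B =====
def transformeLignesScanner_alt (liste : List String) (date : String) : String :=
  let parts := PySem.List.slice liste (some 0) (some 9)
  let parts :=
    if 9 < liste.length then
      let a := PySem.List.pyGetD liste 9 ""
      let b := PySem.List.pyGetD liste 10 ""
      if a = "Datalogic" ∧ b = "VS 2200" then
        parts ++ ["Datalogic", "3200 VSI"]
      else if a = "Datalogic" ∧ (b = "8400 Magellan PSC" ∨ b = "8201 Magellan PSC") then
        parts ++ ["Magellan", "Bi-optique 9800i (9801)"]
      else
        parts ++ [a, b]
    else parts
  let parts := parts ++ PySem.List.slice liste (some 11) (some 29)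
  let parts := if 29 < liste.length then parts ++ [date] else parts
  let parts := parts ++ PySem.List.slice liste (some 30) none
  PySem.Str.join ";" parts

-- ===== PRECONDITION & SPEC =====
-- Pre_ excludes exactly length 10: there A reads liste[10] at i == 9 and raises IndexError (B raises too).
def Pre_transformeLignesScanner (liste : List String) (date : String) : Prop := liste.length ≠ 10
instance (liste : List String) (date : String) : Decidable (Pre_transformeLignesScanner liste date) := by unfold Pre_transformeLignesScanner; infer_instance
def pvWitness_transformeLignesScanner : List String × String := (["a", "b"], "d")

def Spec_transformeLignesScanner (liste : List String) (date : String) (out : String) : Prop := out = transformeLignesScanner_alt liste date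
instance (liste : List String) (date : String) (out : String) : Decidable (Spec_transformeLignesScanner liste date out) := by unfold Spec_transformeLignesScanner; infer_instance

-- ===== CLAIM (what is proved, stated in full; the proofs are below) =====
def Claim_equal_transformeLignesScanner : Prop := ∀ (liste : List String) (date : String), Dom_transformeLignesScanner liste date → Pre_transformeLignesScanner liste date → Spec_transformeLignesScanner liste date (transformeLignesScanner liste date)

-- ===== LEMMAS AND PROOFS =====

-- per-iteration contribution of A's loop body, with the accumulator factored out
def pvStep (liste : List String) (date : String) (i : Int) : List Char :=
  let get : Int → List Char := fun i => (PySem.List.pyGetD liste i "").toList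
  if i = 9 then
    if get 9 = "Datalogic".toList ∧ get 10 = "VS 2200".toList then
      "Datalogic;3200 VSI;".toList
    else if get 9 = "Datalogic".toList ∧
        (get 10 = "8400 Magellan PSC".toList ∨ get 10 = "8201 Magellan PSC".toList) then
      "Magellan;Bi-optique 9800i (9801);".toList
    else
      get i ++ ";".toList ++ get (i + 1) ++ ";".toList
  else if i = 29 then
    date.toList ++ ";".toList
  else if i = 10 then
    []
  else
    get i ++ ";".toList

-- each part of B, followed by one ';'
def pvSemi (ps : List String) : List Char := ps.flatMap (fun p => p.toList ++ [';'])

theorem pvJoin_eq_dropLast (ps : List String) :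
    (PySem.Str.join ";" ps).toList = (pvSemi ps).dropLast := by
  rw [PySem.Str.toList_join]
  induction ps with
  | nil => simp [pvSemi, PySem.Chars.join_nil]
  | cons p t ih =>
    cases t with
    | nil => simp [pvSemi, PySem.Chars.join_singleton]
    | cons q r =>
      simp only [List.map_cons] at ih ⊢
      rw [PySem.Chars.join_cons_cons]
      have hne : pvSemi (q :: r) ≠ [] := by simp [pvSemi]
      have hsp : pvSemi (p :: q :: r) = (p.toList ++ [';']) ++ pvSemi (q :: r) := by
        simp [pvSemi]
      rw [hsp, List.dropLast_append_of_ne_nil hne, ih]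
      simp

-- A's loop is the flatMap of its per-iteration contributions
theorem pvLoop_eq_flatMap (liste : List String) (date : String) (a b : Int) (acc : List Char) :
    (PySem.List.pyRange a b).foldl
      (fun acc i =>
        if i = 9 then
          if (PySem.List.pyGetD liste 9 "").toList = "Datalogic".toList ∧ (PySem.List.pyGetD liste 10 "").toList = "VS 2200".toList then
            acc ++ "Datalogic;3200 VSI;".toList
          else if (PySem.List.pyGetD liste 9 "").toList = "Datalogic".toList ∧
              ((PySem.List.pyGetD liste 10 "").toList = "8400 Magellan PSC".toList ∨ (PySem.List.pyGetD liste 10 "").toList = "8201 Magellan PSC".toList) then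
            acc ++ "Magellan;Bi-optique 9800i (9801);".toList
          else
            acc ++ (PySem.List.pyGetD liste i "").toList ++ ";".toList ++ (PySem.List.pyGetD liste (i + 1) "").toList ++ ";".toList
        else if i = 29 then
          acc ++ date.toList ++ ";".toList
        else if i = 10 then
          acc
        else
          acc ++ (PySem.List.pyGetD liste i "").toList ++ ";".toList) acc
      = acc ++ (PySem.List.pyRange a b).flatMap (pvStep liste date) := by
  rw [PySem.List.foldl_congr_mem _ _
      (fun acc i => acc ++ pvStep liste date i) acc
      (by
        intro acc i _
        simp only [pvStep]
        split_ifs <;> simp)]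
  exact PySem.List.foldl_append_eq_flatMap _ _ _

-- reading indices a..b-1 of liste is the slice liste[a:b]
theorem pvMapGet (liste : List String) (a b : Nat) (hb : b ≤ liste.length) :
    (PySem.List.pyRange (a : Int) (b : Int)).map (fun i => PySem.List.pyGetD liste i "")
      = (liste.drop a).take (b - a) := by
  by_cases hab : b ≤ a
  · rw [PySem.List.pyRange_one_eq_nil (by exact_mod_cast hab)]
    simp [Nat.sub_eq_zero_of_le hab]
  · push_neg at hab
    rw [PySem.List.pyRange_one_cons (by exact_mod_cast hab)]
    have ha : a < liste.length := lt_of_lt_of_le hab hb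
    have h1 : ((a : Int) + 1) = ((a + 1 : Nat) : Int) := by push_cast; ring
    have ih := pvMapGet liste (a + 1) b hb
    rw [List.map_cons, h1, ih, PySem.List.pyGetD_natCast]
    have hd : liste.drop a = liste[a] :: liste.drop (a + 1) :=
      List.drop_eq_getElem_cons ha
    have hba : b - a = (b - (a + 1)) + 1 := by omega
    rw [hd, hba, List.take_succ_cons]
    simp [List.getD, ha]
termination_by b - a

-- over a range avoiding 9, 10 and 29, the loop contributions are the parts of the slice, each closed by ';'
theorem pvFlat_plain (liste : List String) (date : String) (a b : Nat)
    (hb : b ≤ liste.length)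
    (h9 : ∀ i : Int, (a : Int) ≤ i → i < (b : Int) → i ≠ 9 ∧ i ≠ 10 ∧ i ≠ 29) :
    (PySem.List.pyRange (a : Int) (b : Int)).flatMap (pvStep liste date)
      = pvSemi ((liste.drop a).take (b - a)) := by
  have hmap := pvMapGet liste a b hb
  rw [pvSemi, ← hmap, List.flatMap_map]
  apply List.flatMap_congr
  intro i hi
  obtain ⟨h1, h2⟩ := PySem.List.mem_pyRange_one.mp hi
  obtain ⟨n9, n10, n29⟩ := h9 i h1 h2
  simp [pvStep, n9, n10, n29]


theorem pvTrim (xs : List Char) :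
    PySem.List.slice xs (some 0) (some ((xs.length : Int) - 1)) = xs.dropLast := by
  cases xs with
  | nil => simp [pysem]
  | cons c t =>
    have h : (((c :: t).length : Nat) : Int) - 1 = ((t.length : Nat) : Int) := by simp
    rw [h, PySem.List.slice_zero_start, PySem.List.slice_to_natCast]
    rw [List.dropLast_eq_take]
    simp

theorem pvFinish (ps : List String) (X : List Char) (h : X = pvSemi ps) :
    String.ofList (X.dropLast) = PySem.Str.join ";" ps := by
  rw [h, ← pvJoin_eq_dropLast, String.ofList_toList]

theorem transformeLignesScanner_spec : Claim_equal_transformeLignesScanner := by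
  intro liste date _ hpre
  unfold Pre_transformeLignesScanner at hpre
  unfold Spec_transformeLignesScanner
  simp only [transformeLignesScanner, transformeLignesScanner_alt]
  rw [PySem.Chars.slice_eq_listSlice, pvTrim, pvLoop_eq_flatMap, List.nil_append]
  apply pvFinish
  have hlen : PySem.List.len liste = ((liste.length : Nat) : Int) := rfl
  rw [hlen]
  by_cases h9 : liste.length ≤ 9
  · -- short list: only the plain branch of the loop ever runs
    have hf := pvFlat_plain liste date 0 liste.length le_rfl (by intro i h1 h2; refine ⟨by omega, by omega, by omega⟩)
    push_cast at hf
    rw [hf]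
    rw [if_neg (by omega), if_neg (by omega)]
    have d11 : PySem.List.slice liste (some 11) (some 29) = [] := by
      simp [pysem]
      omega
    have d30 : PySem.List.slice liste (some 30) none = [] := by
      simp [pysem]
      omega
    have t1 : List.take (liste.length - 0) (List.drop 0 liste) = liste := by simp
    have t2 : PySem.List.slice liste (some 0) (some 9) = liste := by
      simp [pysem]
      omega
    rw [d11, d30, t1, t2]
    simp
  · have h11 : 11 ≤ liste.length := by omega
    have hb9 : ((9:Nat):Int) ≤ ((liste.length:Nat):Int) := by exact_mod_cast (by omega : (9:Nat) ≤ liste.length)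
    have hb11 : ((11:Nat):Int) ≤ ((liste.length:Nat):Int) := by exact_mod_cast h11
    rw [PySem.List.pyRange_one_append 0 9 ((liste.length:Nat):Int) (by norm_num) (by push_cast at hb9 ⊢; exact hb9)]
    rw [PySem.List.pyRange_one_append 9 11 ((liste.length:Nat):Int) (by norm_num) (by push_cast at hb11 ⊢; exact hb11)]
    rw [List.flatMap_append, List.flatMap_append]
    have hf0 := pvFlat_plain liste date 0 9 (by omega) (by intro i h1 h2; refine ⟨by omega, by omega, by omega⟩)
    push_cast at hf0
    rw [hf0]
    have hr : PySem.List.pyRange 9 11 = [9, 10] := by decide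
    rw [hr]
    have hsl0 : PySem.List.slice liste (some 0) (some 9) = List.take 9 (List.drop 0 liste) := by
      simp [pysem]
    by_cases h29 : liste.length ≤ 29
    · have hf1 := pvFlat_plain liste date 11 liste.length le_rfl (by intro i h1 h2; refine ⟨by omega, by omega, by omega⟩)
      push_cast at hf1
      rw [hf1]
      rw [if_pos (by omega : 9 < liste.length), if_neg (by omega : ¬ 29 < liste.length)]
      have d30 : PySem.List.slice liste (some 30) none = [] := by
        simp [pysem]
        omega
      have eA : List.take (liste.length - 11) (List.drop 11 liste) = List.drop 11 liste :=
        List.take_of_length_le (by simp)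
      have eB : PySem.List.slice liste (some 11) (some 29) = List.drop 11 liste := by
        have h18 : PySem.List.slice liste (some 11) (some 29) = List.take 18 (List.drop 11 liste) := by
          simp [pysem]
        rw [h18]
        exact List.take_of_length_le (by simp; omega)
      rw [d30, eA, eB, hsl0]
      simp only [List.flatMap_cons, List.flatMap_nil, List.append_nil, List.append_assoc]
      simp only [pvStep, String.toList_inj]
      norm_num
      split_ifs with hc1 hc2 <;>
        simp [pvSemi]
    · have h30 : 30 ≤ liste.length := by omega
      rw [PySem.List.pyRange_one_append 11 29 ((liste.length:Nat):Int) (by norm_num) (by exact_mod_cast (by omega : (29:Nat) ≤ liste.length))]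
      rw [PySem.List.pyRange_one_append 29 30 ((liste.length:Nat):Int) (by norm_num) (by exact_mod_cast h30)]
      rw [List.flatMap_append, List.flatMap_append]
      have hf1 := pvFlat_plain liste date 11 29 (by omega) (by intro i h1 h2; refine ⟨by omega, by omega, by omega⟩)
      push_cast at hf1
      rw [hf1]
      have hr29 : PySem.List.pyRange 29 30 = [29] := by decide
      rw [hr29]
      have hf2 := pvFlat_plain liste date 30 liste.length le_rfl (by intro i h1 h2; refine ⟨by omega, by omega, by omega⟩)
      push_cast at hf2
      rw [hf2]
      rw [if_pos (by omega : 9 < liste.length), if_pos (by omega : 29 < liste.length)]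
      have e18 : PySem.List.slice liste (some 11) (some 29) = List.take (29 - 11) (List.drop 11 liste) := by
        simp [pysem]
      have e30 : PySem.List.slice liste (some 30) none = List.take (liste.length - 30) (List.drop 30 liste) := by
        rw [List.take_of_length_le (by simp)]
        simp [pysem]
      rw [e18, e30, hsl0]
      simp only [List.flatMap_cons, List.flatMap_nil, List.append_nil, List.append_assoc]
      simp only [pvStep, String.toList_inj]
      norm_num
      split_ifs with hc1 hc2 <;>
        simp [pvSemi]
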